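-- pv_equiv track=rewrite | github.com/HerveShima/asset-vision-project | app.py | pricing_confidence_ceiling
-- ===== SOURCE A (Python) =====
-- GENERIC_ITEM_TERMS = {
--     "chair", "table", "desk", "dresser", "sofa", "couch", "shoe", "sneaker",
--     "boot", "shirt", "pants", "jacket", "coat", "backpack", "bag", "lamp",
--     "phone", "laptop", "tablet", "tv", "television", "monitor", "speaker",
--     "headphone", "earbud", "appliance", "microwave", "refrigerator", "fridge",
--     "washer", "dryer", "vacuum", "blender", "mixer", "fan", "bed", "mattress",
-- }
--
-- GENERIC_MODIFIERS = {
--     "black", "white", "brown", "wooden", "metal", "plastic", "pair", "set",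
--     "office", "home", "indoor", "outdoor", "small", "large", "standard",
--     "generic", "basic",
-- }
--
-- def normalized_name(value):
--     return "".join(ch.lower() for ch in (value or "") if ch.isalnum() or ch.isspace()).strip()
--
-- def singularize_token(token):
--     token = (token or "").strip().lower()
--     if token.endswith("ies") and len(token) > 3:
--         return token[:-3] + "y"
--     if token.endswith("ses") and len(token) > 3:
--         return token[:-2]
--     if token.endswith("s") and len(token) > 2 and not token.endswith("ss"):
--         return token[:-1]
--     return token
--
-- def assess_pricing_detail(name, category):
--     tokens = [token for token in normalized_name(name).split() if token]
--     singular_tokens = [singularize_token(token) for token in tokens]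
--     non_modifier_tokens = [token for token in singular_tokens if token not in GENERIC_MODIFIERS]
--     specific_tokens = [token for token in non_modifier_tokens if token not in GENERIC_ITEM_TERMS]
--
--     if not non_modifier_tokens:
--         return False, "This item needs a clearer brand, model, or more specific label before HomeVault can estimate a reliable market value."
--
--     if len(non_modifier_tokens) == 1 and non_modifier_tokens[0] in GENERIC_ITEM_TERMS:
--         if category == "Electronics":
--             return False, "This item may be claim-eligible, but the photo is too broad for reliable pricing. Capture a clearer photo with the brand or model visible."
--         if category == "Furniture":
--             return False, "This item may be claim-eligible, but the label is too broad for reliable pricing. Capture the full item clearly and use a more specific furniture type."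
--         if non_modifier_tokens[0] in {"shoe", "sneaker", "boot", "backpack", "bag", "shirt", "jacket", "coat"}:
--             return False, "This item may be claim-eligible, but the photo needs more detail. Capture the full item clearly and include any visible brand or logo."
--         return False, "This item may be claim-eligible, but the label is too broad for reliable sold-listing pricing. Capture a clearer photo and use a more specific item type."
--
--     if not specific_tokens and category == "Other":
--         if any(token in {"shoe", "sneaker", "boot", "backpack", "bag", "shirt", "jacket", "coat"} for token in
--                non_modifier_tokens):
--             return False, "This item may be personal property, but pricing needs a clearer photo of the full item and any visible brand or logo."
--         return False, "This item may be personal property, but pricing needs a clearer photo and a more specific product name before it can be trusted."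
--
--     return True, None
--
-- def pricing_confidence_ceiling(name, category):
--     pricing_ready, _note = assess_pricing_detail(name, category)
--     if pricing_ready:
--         return 100
--
--     normalized_tokens = {singularize_token(token) for token in normalized_name(name).split() if token}
--     if category == "Electronics":
--         return 72
--     if category == "Furniture":
--         return 76
--     if normalized_tokens & {"shoe", "sneaker", "boot", "backpack", "bag", "shirt", "jacket", "coat"}:
--         return 74
--     return 70
-- ===== SOURCE B (Python) =====
-- GENERIC_ITEM_TERMS = {
--     "chair", "table", "desk", "dresser", "sofa", "couch", "shoe", "sneaker",
--     "boot", "shirt", "pants", "jacket", "coat", "backpack", "bag", "lamp",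
--     "phone", "laptop", "tablet", "tv", "television", "monitor", "speaker",
--     "headphone", "earbud", "appliance", "microwave", "refrigerator", "fridge",
--     "washer", "dryer", "vacuum", "blender", "mixer", "fan", "bed", "mattress",
-- }
--
-- GENERIC_MODIFIERS = {
--     "black", "white", "brown", "wooden", "metal", "plastic", "pair", "set",
--     "office", "home", "indoor", "outdoor", "small", "large", "standard",
--     "generic", "basic",
-- }
--
-- FASHION_TERMS = {"shoe", "sneaker", "boot", "backpack", "bag", "shirt", "jacket", "coat"}
--
--
-- def singularize_token(token):
--     token = (token or "").strip().lower()
--     if token.endswith("ies") and len(token) > 3: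
--         return token[:-3] + "y"
--     if token.endswith("ses") and len(token) > 3:
--         return token[:-2]
--     if token.endswith("s") and len(token) > 2 and not token.endswith("ss"):
--         return token[:-1]
--     return token
--
--
-- def _consume(state, token):
--     # fold one completed raw token into the running summary
--     nm, first_nm, has_specific, has_fashion = state
--     s = singularize_token(token)
--     has_fashion = has_fashion or s in FASHION_TERMS
--     if s not in GENERIC_MODIFIERS:
--         if nm == 0:
--             first_nm = s
--         nm += 1
--         if s not in GENERIC_ITEM_TERMS:
--             has_specific = True
--     return nm, first_nm, has_specific, has_fashion
--
--
-- def pricing_confidence_ceiling(name, category):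
--     # Single streaming pass over the raw characters: tokens are recognised on
--     # the fly (alnum chars extend the current token, lowered; whitespace ends
--     # it; anything else is dropped so the token continues across punctuation),
--     # and each finished token is folded into a four-field summary.  No
--     # normalized string, no token lists, no intersection sets are ever built.
--     state = (0, None, False, False)
--     cur = ""
--     for ch in (name or ""):
--         if ch.isalnum():
--             cur += ch.lower()
--         elif ch.isspace():
--             if cur:
--                 state = _consume(state, cur)
--                 cur = ""
--         # other characters are dropped; the current token continues across them
--     if cur:
--         state = _consume(state, cur)
--     nm, first_nm, has_specific, has_fashion = state
--
--     not_ready = (nm == 0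
--                  or (nm == 1 and first_nm in GENERIC_ITEM_TERMS)
--                  or (not has_specific and category == "Other"))
--     if not not_ready:
--         return 100
--     if category == "Electronics":
--         return 72
--     if category == "Furniture":
--         return 76
--     if has_fashion:
--         return 74
--     return 70
-- ===== Notes on version B (the rewrite author's own statement) =====
-- stated objective: alternative
-- what changed: B replaces A's staged pipeline (build the normalized string, split it into a token list, three list comprehensions, then re-tokenize the name a second time into a set intersected with the fashion set) by a single streaming pass over the raw characters that recognises tokens on the fly and folds each finished token into a four-field summary (count, first non-modifier, specific-seen, fashion-seen); no intermediate string, token list or set is materialised.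
import Mathlib
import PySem

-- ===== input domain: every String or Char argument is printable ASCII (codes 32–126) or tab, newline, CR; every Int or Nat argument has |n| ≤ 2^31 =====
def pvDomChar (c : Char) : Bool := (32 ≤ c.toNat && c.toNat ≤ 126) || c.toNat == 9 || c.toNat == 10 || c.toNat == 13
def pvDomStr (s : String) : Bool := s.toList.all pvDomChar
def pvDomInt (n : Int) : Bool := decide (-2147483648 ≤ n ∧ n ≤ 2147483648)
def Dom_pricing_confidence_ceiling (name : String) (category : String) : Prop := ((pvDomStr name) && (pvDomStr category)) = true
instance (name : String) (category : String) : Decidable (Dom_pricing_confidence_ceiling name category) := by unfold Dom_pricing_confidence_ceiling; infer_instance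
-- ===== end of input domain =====

-- B replaces A's staged pipeline (normalize string → split → three list comprehensions →
-- re-tokenize into a set) by ONE streaming pass over the raw characters that recognises
-- tokens on the fly and folds each into a four-field summary (objective: alternative).

-- ===== PORT A =====
def GENERIC_ITEM_TERMS : PySem.Set String := PySem.Set.ofList
  ["chair", "table", "desk", "dresser", "sofa", "couch", "shoe", "sneaker",
   "boot", "shirt", "pants", "jacket", "coat", "backpack", "bag", "lamp",
   "phone", "laptop", "tablet", "tv", "television", "monitor", "speaker",
   "headphone", "earbud", "appliance", "microwave", "refrigerator", "fridge",
   "washer", "dryer", "vacuum", "blender", "mixer", "fan", "bed", "mattress"]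

def GENERIC_MODIFIERS : PySem.Set String := PySem.Set.ofList
  ["black", "white", "brown", "wooden", "metal", "plastic", "pair", "set",
   "office", "home", "indoor", "outdoor", "small", "large", "standard",
   "generic", "basic"]

-- the set literal {"shoe", …, "coat"} that appears inline in A (three times) and once in B
def FASHION_TERMS : PySem.Set String := PySem.Set.ofList
  ["shoe", "sneaker", "boot", "backpack", "bag", "shirt", "jacket", "coat"]

-- "".join(ch.lower() for ch in (value or "") if ch.isalnum() or ch.isspace()).strip()
-- ('value or ""' is 'value' itself for a non-empty string and "" for "": identical result)
def normalized_name (value : String) : String :=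
  PySem.Str.strip (String.ofList ((value.toList.filter
    (fun ch => PySem.Chars.isalnum ch || PySem.Chars.isspace ch)).map PySem.Chars.lowerChar))

def singularize_token (token : String) : String :=
  let t := PySem.Str.lower (PySem.Str.strip token)
  if PySem.Str.endswith t "ies" && decide (3 < (PySem.Str.len t)) then
    PySem.Str.slice t none (some (-3)) ++ "y"
  else if PySem.Str.endswith t "ses" && decide (3 < (PySem.Str.len t)) then
    PySem.Str.slice t none (some (-2))
  else if PySem.Str.endswith t "s" && decide (2 < (PySem.Str.len t)) && !(PySem.Str.endswith t "ss") then
    PySem.Str.slice t none (some (-1))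
  else t

def assess_pricing_detail (name : String) (category : String) : Bool × Option String :=
  let tokens := (PySem.Str.split₀ (normalized_name name)).filter (fun t => t ≠ "")
  let singular_tokens := tokens.map singularize_token
  let non_modifier_tokens := singular_tokens.filter (fun t => !(GENERIC_MODIFIERS.contains t))
  let specific_tokens := non_modifier_tokens.filter (fun t => !(GENERIC_ITEM_TERMS.contains t))
  if non_modifier_tokens.isEmpty then
    (false, some "This item needs a clearer brand, model, or more specific label before HomeVault can estimate a reliable market value.")
  -- non_modifier_tokens[0]: the list is non-empty under this guard, so headD "" is exact
  else if non_modifier_tokens.length == 1 && GENERIC_ITEM_TERMS.contains (non_modifier_tokens.headD "") then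
    if category == "Electronics" then
      (false, some "This item may be claim-eligible, but the photo is too broad for reliable pricing. Capture a clearer photo with the brand or model visible.")
    else if category == "Furniture" then
      (false, some "This item may be claim-eligible, but the label is too broad for reliable pricing. Capture the full item clearly and use a more specific furniture type.")
    else if FASHION_TERMS.contains (non_modifier_tokens.headD "") then
      (false, some "This item may be claim-eligible, but the photo needs more detail. Capture the full item clearly and include any visible brand or logo.")
    else
      (false, some "This item may be claim-eligible, but the label is too broad for reliable sold-listing pricing. Capture a clearer photo and use a more specific item type.")
  else if specific_tokens.isEmpty && category == "Other" then
    if non_modifier_tokens.any (fun t => FASHION_TERMS.contains t) then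
      (false, some "This item may be personal property, but pricing needs a clearer photo of the full item and any visible brand or logo.")
    else
      (false, some "This item may be personal property, but pricing needs a clearer photo and a more specific product name before it can be trusted.")
  else (true, none)

def pricing_confidence_ceiling (name : String) (category : String) : Int :=
  let pricing_ready := (assess_pricing_detail name category).1
  if pricing_ready then 100
  else
    let normalized_tokens : PySem.Set String :=
      PySem.Set.ofList (((PySem.Str.split₀ (normalized_name name)).filter (fun t => t ≠ "")).map singularize_token)
    if category == "Electronics" then 72
    else if category == "Furniture" then 76
    -- truthiness of 'normalized_tokens & {...}' = the intersection list being non-empty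
    else if !(PySem.Set.inter normalized_tokens FASHION_TERMS).isEmpty then 74
    else 70

-- ===== PORT B =====
-- state = (nm, first_nm, has_specific, has_fashion), the running summary in Source B's _consume
def pccConsume (st : Int × Option String × Bool × Bool) (tok : String) :
    Int × Option String × Bool × Bool :=
  let s := singularize_token tok
  let has_fashion := st.2.2.2 || FASHION_TERMS.contains s
  if !(GENERIC_MODIFIERS.contains s) then
    let first_nm := if st.1 == 0 then some s else st.2.1
    (st.1 + 1, first_nm, st.2.2.1 || !(GENERIC_ITEM_TERMS.contains s), has_fashion)
  else
    (st.1, st.2.1, st.2.2.1, has_fashion)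

-- Source B's character loop as structural recursion: alnum extends the current token (lowered),
-- whitespace flushes it into the summary, every other character is dropped
def pccLoop : List Char → List Char → (Int × Option String × Bool × Bool) →
    Int × Option String × Bool × Bool
  | [], cur, st => if cur.isEmpty then st else pccConsume st (String.ofList cur)
  | c :: rest, cur, st =>
    if PySem.Chars.isalnum c then pccLoop rest (cur ++ [PySem.Chars.lowerChar c]) st
    else if PySem.Chars.isspace c then
      if cur.isEmpty then pccLoop rest [] st
      else pccLoop rest [] (pccConsume st (String.ofList cur))
    else pccLoop rest cur st

def pricing_confidence_ceiling_alt (name : String) (category : String) : Int :=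
  let st := pccLoop name.toList [] (0, none, false, false)
  -- 'first_nm in GENERIC_ITEM_TERMS' with first_nm possibly None: None is never a member
  let not_ready := st.1 == 0
    || (st.1 == 1 && (match st.2.1 with | some s => GENERIC_ITEM_TERMS.contains s | none => false))
    || (!st.2.2.1 && category == "Other")
  if !not_ready then 100
  else if category == "Electronics" then 72
  else if category == "Furniture" then 76
  else if st.2.2.2 then 74
  else 70

-- ===== PRECONDITION & SPEC =====
def Spec_pricing_confidence_ceiling (name : String) (category : String) (out : Int) : Prop := out = pricing_confidence_ceiling_alt name category
instance (name : String) (category : String) (out : Int) : Decidable (Spec_pricing_confidence_ceiling name category out) := by unfold Spec_pricing_confidence_ceiling; infer_instance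

-- ===== CLAIM (what is proved, stated in full; the proofs are below) =====
def Claim_equal_pricing_confidence_ceiling : Prop := ∀ (name : String) (category : String), Dom_pricing_confidence_ceiling name category → Spec_pricing_confidence_ceiling name category (pricing_confidence_ceiling name category)

-- ===== LEMMAS AND PROOFS =====

def pccFiltMap (l : List Char) : List Char :=
  (l.filter (fun ch => PySem.Chars.isalnum ch || PySem.Chars.isspace ch)).map PySem.Chars.lowerChar

-- character facts ------------------------------------------------------------
lemma alnum_not_space (c : Char) (h : PySem.Chars.isalnum c = true) :
    PySem.Chars.isspace c = false := by
  revert h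
  simp only [PySem.Chars.isalnum, PySem.Chars.isalpha, PySem.Chars.isdigit, PySem.Chars.isspace,
    PySem.Chars.isupper, PySem.Chars.islower, Char.le_def, UInt32.le_iff_toNat_le,
    Bool.or_eq_true, Bool.and_eq_true, decide_eq_true_eq, Bool.or_eq_false_iff,
    Bool.and_eq_false_iff, decide_eq_false_iff_not, Char.toNat, Char.reduceVal, UInt32.reduceToNat]
  intro h
  omega

lemma toNat_ofNat_small (n : Nat) (h : n < 55296) : (Char.ofNat n).toNat = n := by
  have hv : n.isValidChar := Or.inl h
  unfold Char.ofNat Char.ofNatAux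
  rw [dif_pos hv]
  simp [Char.toNat, UInt32.toNat_ofNatLT]

lemma lowerChar_of_space (c : Char) (h : PySem.Chars.isspace c = true) :
    PySem.Chars.lowerChar c = c := by
  have hu : PySem.Chars.isupper c = false := by
    revert h
    simp only [PySem.Chars.isspace, PySem.Chars.isupper, Char.le_def, UInt32.le_iff_toNat_le,
      Bool.or_eq_true, Bool.and_eq_true, decide_eq_true_eq, Bool.and_eq_false_iff,
      decide_eq_false_iff_not, Char.toNat, Char.reduceVal, UInt32.reduceToNat]
    intro h
    omega
  simp [PySem.Chars.lowerChar, hu]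

lemma alnum_lower_not_space (c : Char) (h : PySem.Chars.isalnum c = true) :
    PySem.Chars.isspace (PySem.Chars.lowerChar c) = false := by
  by_cases hu : PySem.Chars.isupper c = true
  · have hb : (65 : Nat) ≤ c.toNat ∧ c.toNat ≤ 90 := by
      revert hu
      simp only [PySem.Chars.isupper, Char.le_def, UInt32.le_iff_toNat_le,
        Bool.and_eq_true, decide_eq_true_eq, Char.toNat, Char.reduceVal, UInt32.reduceToNat]
      omega
    have ht : (Char.ofNat (c.toNat + 32)).toNat = c.toNat + 32 :=
      toNat_ofNat_small _ (by omega)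
    simp only [PySem.Chars.lowerChar, hu, if_true]
    simp only [PySem.Chars.isspace, ht, Bool.or_eq_false_iff, Bool.and_eq_false_iff,
      decide_eq_false_iff_not]
    omega
  · simp only [PySem.Chars.lowerChar, hu]
    exact alnum_not_space c h

-- tokenizer bridge: Source B's streaming loop = fold of pccConsume over split₀'s tokens -------
lemma inter_ofList_nonempty (xs : List String) (t : PySem.Set String) :
    (!(PySem.Set.inter (PySem.Set.ofList xs) t).isEmpty) = xs.any (fun x => t.contains x) := by
  rw [Bool.eq_iff_iff]
  simp [List.eq_nil_iff_forall_not_mem, PySem.Set.mem_inter, PySem.Set.mem_ofList, PySem.Set.contains]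

-- characterisation of the summary fold over a token list --------------------------------

lemma pccLoop_eq_go (chars : List Char) :
    ∀ (cur : List Char) (acc : List (List Char)) (st : Int × Option String × Bool × Bool),
    pccLoop chars cur (List.foldl pccConsume st (acc.reverse.map String.ofList)) =
    List.foldl pccConsume st
      ((PySem.Chars.split₀.go (pccFiltMap chars) cur.reverse acc).map String.ofList) := by
  induction chars with
  | nil =>
    intro cur acc st
    simp only [pccFiltMap, List.filter_nil, List.map_nil, PySem.Chars.split₀.go, pccLoop]
    by_cases hc : cur.isEmpty
    · have h0 : cur = [] := List.isEmpty_iff.mp hc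
      subst h0
      simp
    · have h0 : cur ≠ [] := by simpa [List.isEmpty_iff] using hc
      have hcr : cur.reverse.isEmpty = false := by simp [h0]
      simp [hc, hcr, List.foldl_append]
  | cons c rest ih =>
    intro cur acc st
    simp only [pccFiltMap, List.filter_cons, pccLoop]
    by_cases h1 : PySem.Chars.isalnum c = true
    · have hs := alnum_not_space c h1
      have hls := alnum_lower_not_space c h1
      simp only [h1, hs, Bool.true_or, if_true, List.map_cons, PySem.Chars.split₀.go, hls,
        Bool.false_eq_true, if_false]
      have := ih (cur ++ [PySem.Chars.lowerChar c]) acc st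
      simpa [pccFiltMap] using this
    · by_cases h2 : PySem.Chars.isspace c = true
      · have hl := lowerChar_of_space c h2
        simp only [h1, h2, Bool.false_or, if_true, Bool.false_eq_true, if_false, List.map_cons,
          PySem.Chars.split₀.go, hl]
        by_cases hc : cur.isEmpty
        · have h0 : cur = [] := List.isEmpty_iff.mp hc
          subst h0
          simp only [List.reverse_nil, if_true, hc]
          exact ih [] acc st
        · have h0 : cur ≠ [] := by simpa [List.isEmpty_iff] using hc
          have hcr : cur.reverse.isEmpty = false := by simp [h0]
          simp only [hc, hcr, Bool.false_eq_true, if_false, List.reverse_reverse]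
          have := ih [] (cur :: acc) st
          simp only [List.reverse_cons, List.map_append, List.map_cons, List.map_nil,
            List.foldl_append, List.foldl_cons, List.foldl_nil] at this
          simpa using this
      · simp only [h1, h2, Bool.or_self, Bool.false_eq_true, if_false]
        exact ih cur acc st
lemma split₀_go_append_ws (ws : List Char) (hws : ∀ c ∈ ws, PySem.Chars.isspace c = true) :
    ∀ (l cur : List Char) (acc : List (List Char)),
    PySem.Chars.split₀.go (l ++ ws) cur acc = PySem.Chars.split₀.go l cur acc := by
  intro l
  induction l with
  | nil =>
    intro cur acc
    simp only [List.nil_append]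
    induction ws generalizing cur acc with
    | nil => rfl
    | cons w rest ihw =>
      have hw : PySem.Chars.isspace w = true := hws w (by simp)
      have hrest : ∀ c ∈ rest, PySem.Chars.isspace c = true := fun c hc => hws c (by simp [hc])
      simp only [PySem.Chars.split₀.go, hw, if_true]
      by_cases hc : cur.isEmpty
      · have h0 : cur = [] := List.isEmpty_iff.mp hc
        subst h0
        simp only [hc, if_true]
        rw [ihw hrest [] acc]
        rfl
      · simp only [hc, Bool.false_eq_true, if_false]
        rw [ihw hrest [] (cur.reverse :: acc)]
        simp only [PySem.Chars.split₀.go, List.isEmpty_nil, if_true]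
  | cons c rest ih =>
    intro cur acc
    simp only [List.cons_append, PySem.Chars.split₀.go]
    by_cases hs : PySem.Chars.isspace c = true
    · simp only [hs, if_true]
      by_cases hc : cur.isEmpty
      · simp only [hc, if_true, ih]
      · simp only [hc, Bool.false_eq_true, if_false, ih]
    · simp only [hs, Bool.false_eq_true, if_false, ih]
lemma lstrip_go (l : List Char) (acc : List (List Char)) :
    PySem.Chars.split₀.go (List.dropWhile PySem.Chars.isspace l) [] acc =
    PySem.Chars.split₀.go l [] acc := by
  induction l with
  | nil => rfl
  | cons c rest ih =>
    by_cases hs : PySem.Chars.isspace c = true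
    · rw [List.dropWhile_cons_of_pos hs]
      rw [ih]
      conv_rhs => rw [PySem.Chars.split₀.go]
      simp [hs]
    · rw [List.dropWhile_cons_of_neg (by simp [hs])]

lemma split₀_strip (l : List Char) :
    PySem.Chars.split₀ (PySem.Chars.strip l) = PySem.Chars.split₀ l := by
  unfold PySem.Chars.strip PySem.Chars.rstrip PySem.Chars.lstrip PySem.Chars.split₀
  set m := List.dropWhile PySem.Chars.isspace l with hm
  have hdecomp : m = (List.dropWhile PySem.Chars.isspace m.reverse).reverse ++
      (List.takeWhile PySem.Chars.isspace m.reverse).reverse := by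
    have := List.takeWhile_append_dropWhile (p := PySem.Chars.isspace) (l := m.reverse)
    conv_lhs => rw [← m.reverse_reverse, ← this]
    rw [List.reverse_append]
  have hws : ∀ c ∈ (List.takeWhile PySem.Chars.isspace m.reverse).reverse,
      PySem.Chars.isspace c = true := by
    intro c hc
    rw [List.mem_reverse] at hc
    exact List.mem_takeWhile_imp hc
  calc PySem.Chars.split₀.go (List.dropWhile PySem.Chars.isspace m.reverse).reverse [] []
      = PySem.Chars.split₀.go ((List.dropWhile PySem.Chars.isspace m.reverse).reverse ++
          (List.takeWhile PySem.Chars.isspace m.reverse).reverse) [] [] := by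
        rw [split₀_go_append_ws _ hws]
    _ = PySem.Chars.split₀.go m [] [] := by rw [← hdecomp]
    _ = PySem.Chars.split₀.go l [] [] := lstrip_go l []
lemma split₀_go_nonempty (l : List Char) :
    ∀ (cur : List Char) (acc : List (List Char)), (∀ t ∈ acc, t ≠ []) →
    ∀ t ∈ PySem.Chars.split₀.go l cur acc, t ≠ [] := by
  induction l with
  | nil =>
    intro cur acc hacc t ht
    simp only [PySem.Chars.split₀.go] at ht
    by_cases hc : cur.isEmpty
    · simp only [hc, if_true, List.mem_reverse] at ht
      exact hacc t ht
    · simp only [hc, Bool.false_eq_true, if_false, List.mem_reverse, List.mem_cons] at ht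
      rcases ht with h | h
      · subst h
        have h0 : cur ≠ [] := by simpa [List.isEmpty_iff] using hc
        simp [h0]
      · exact hacc t h
  | cons c rest ih =>
    intro cur acc hacc t ht
    simp only [PySem.Chars.split₀.go] at ht
    by_cases hs : PySem.Chars.isspace c = true
    · simp only [hs, if_true] at ht
      by_cases hc : cur.isEmpty
      · simp only [hc, if_true] at ht
        exact ih [] acc hacc t ht
      · simp only [hc, Bool.false_eq_true, if_false] at ht
        refine ih [] (cur.reverse :: acc) ?_ t ht
        intro u hu
        rcases List.mem_cons.mp hu with h | h
        · subst h
          have h0 : cur ≠ [] := by simpa [List.isEmpty_iff] using hc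
          simp [h0]
        · exact hacc u h
    · simp only [hs, Bool.false_eq_true, if_false] at ht
      exact ih (c :: cur) acc hacc t ht
lemma consume_mod (st : Int × Option String × Bool × Bool) (tok : String)
    (hm : GENERIC_MODIFIERS.contains (singularize_token tok) = true) :
    pccConsume st tok =
      (st.1, st.2.1, st.2.2.1, st.2.2.2 || FASHION_TERMS.contains (singularize_token tok)) := by
  simp only [pccConsume, hm, Bool.not_true, Bool.false_eq_true, if_false]

lemma consume_nonmod (st : Int × Option String × Bool × Bool) (tok : String)
    (hm : GENERIC_MODIFIERS.contains (singularize_token tok) = false) :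
    pccConsume st tok =
      (st.1 + 1, (if st.1 == 0 then some (singularize_token tok) else st.2.1),
       st.2.2.1 || !(GENERIC_ITEM_TERMS.contains (singularize_token tok)),
       st.2.2.2 || FASHION_TERMS.contains (singularize_token tok)) := by
  simp only [pccConsume, hm, Bool.not_false, if_true]

lemma fold_consume_pos (toks : List String) :
    ∀ (n : Int) (f : Option String) (sp fa : Bool), 1 ≤ n →
    List.foldl pccConsume (n, f, sp, fa) toks =
    ( n + ((toks.map singularize_token).filter (fun t => !(GENERIC_MODIFIERS.contains t))).length,
      f,
      sp || !(((toks.map singularize_token).filter (fun t => !(GENERIC_MODIFIERS.contains t))).filter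
        (fun t => !(GENERIC_ITEM_TERMS.contains t))).isEmpty,
      fa || (toks.map singularize_token).any (fun t => FASHION_TERMS.contains t)) := by
  induction toks with
  | nil => intro n f sp fa hn; simp
  | cons tok rest ih =>
    intro n f sp fa hn
    simp only [List.foldl_cons, List.map_cons, List.filter_cons, List.any_cons]
    by_cases hm : GENERIC_MODIFIERS.contains (singularize_token tok) = true
    · rw [consume_mod _ _ hm, ih _ _ _ _ hn]
      simp only [hm, Bool.not_true, Bool.false_eq_true, if_false, Bool.or_assoc]
    · rw [consume_nonmod _ _ (by simpa using hm)]
      have hnz : (n == 0) = false := by simp; omega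
      rw [if_neg (by simp [hnz])]
      rw [ih _ _ _ _ (by omega)]
      simp only [(by simpa using hm : GENERIC_MODIFIERS.contains (singularize_token tok) = false),
        Bool.not_false, if_true, List.filter_cons, List.length_cons, Bool.or_assoc]
      by_cases hg : GENERIC_ITEM_TERMS.contains (singularize_token tok) = true
      · simp only [hg, Bool.not_true, Bool.false_eq_true, if_false, Bool.false_or]
        refine Prod.ext ?_ (by rfl)
        push_cast; ring
      · simp only [(by simpa using hg : GENERIC_ITEM_TERMS.contains (singularize_token tok) = false),
          Bool.not_false, if_true, List.isEmpty_cons, Bool.true_or]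
        refine Prod.ext ?_ (by rfl)
        push_cast; ring
lemma fold_consume_zero (toks : List String) :
    ∀ (sp fa : Bool),
    List.foldl pccConsume (0, none, sp, fa) toks =
    ( (((toks.map singularize_token).filter (fun t => !(GENERIC_MODIFIERS.contains t))).length : Int),
      ((toks.map singularize_token).filter (fun t => !(GENERIC_MODIFIERS.contains t))).head?,
      sp || !(((toks.map singularize_token).filter (fun t => !(GENERIC_MODIFIERS.contains t))).filter
        (fun t => !(GENERIC_ITEM_TERMS.contains t))).isEmpty,
      fa || (toks.map singularize_token).any (fun t => FASHION_TERMS.contains t)) := by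
  induction toks with
  | nil => intro sp fa; simp
  | cons tok rest ih =>
    intro sp fa
    simp only [List.foldl_cons, List.map_cons, List.filter_cons, List.any_cons]
    by_cases hm : GENERIC_MODIFIERS.contains (singularize_token tok) = true
    · rw [consume_mod _ _ hm, ih]
      simp only [hm, Bool.not_true, Bool.false_eq_true, if_false, Bool.or_assoc]
    · rw [consume_nonmod _ _ (by simpa using hm)]
      simp only [beq_self_eq_true, if_true, zero_add]
      rw [fold_consume_pos rest 1 _ _ _ (by omega)]
      simp only [(by simpa using hm : GENERIC_MODIFIERS.contains (singularize_token tok) = false),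
        Bool.not_false, if_true, List.filter_cons, List.length_cons, List.head?_cons, Bool.or_assoc]
      by_cases hg : GENERIC_ITEM_TERMS.contains (singularize_token tok) = true
      · simp only [hg, Bool.not_true, Bool.false_eq_true, if_false, Bool.false_or]
        refine Prod.ext ?_ (by rfl)
        push_cast; ring
      · simp only [(by simpa using hg : GENERIC_ITEM_TERMS.contains (singularize_token tok) = false),
          Bool.not_false, if_true, List.isEmpty_cons, Bool.true_or]
        refine Prod.ext ?_ (by rfl)
        push_cast; ring
lemma tokens_eq (name : String) :
    (PySem.Str.split₀ (normalized_name name)).filter (fun t => t ≠ "") =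
    (PySem.Chars.split₀ (pccFiltMap name.toList)).map String.ofList := by
  have h1 : (normalized_name name).toList = PySem.Chars.strip (pccFiltMap name.toList) := by
    have hml : (String.ofList ((name.toList.filter
        (fun ch => PySem.Chars.isalnum ch || PySem.Chars.isspace ch)).map PySem.Chars.lowerChar)).toList =
        (name.toList.filter
        (fun ch => PySem.Chars.isalnum ch || PySem.Chars.isspace ch)).map PySem.Chars.lowerChar :=
      Eq.symm (String.ofList_eq.mp rfl)
    rw [normalized_name, PySem.Str.toList_strip, hml, pccFiltMap]
  have h2 : PySem.Str.split₀ (normalized_name name) =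
      (PySem.Chars.split₀ (pccFiltMap name.toList)).map String.ofList := by
    rw [PySem.Str.split₀, h1, split₀_strip]
  rw [h2]
  apply List.filter_eq_self.mpr
  intro t ht
  rcases List.mem_map.mp ht with ⟨u, hu, rfl⟩
  have hne : u ≠ [] := split₀_go_nonempty _ [] [] (by intro t h; cases h) u hu
  rw [decide_eq_true_eq]
  intro hcon
  exact hne (by simpa using congrArg String.toList hcon)

lemma alt_state (name : String) :
    pccLoop name.toList [] (0, none, false, false) =
    (let sing := ((PySem.Str.split₀ (normalized_name name)).filter (fun t => t ≠ "")).map singularize_token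
     let nonmod := sing.filter (fun t => !(GENERIC_MODIFIERS.contains t))
     ((nonmod.length : Int), nonmod.head?,
      !(nonmod.filter (fun t => !(GENERIC_ITEM_TERMS.contains t))).isEmpty,
      sing.any (fun t => FASHION_TERMS.contains t))) := by
  have h := pccLoop_eq_go name.toList [] [] (0, none, false, false)
  simp only [List.reverse_nil, List.map_nil, List.foldl_nil] at h
  rw [h]
  have hgo : PySem.Chars.split₀.go (pccFiltMap name.toList) [] [] =
      PySem.Chars.split₀ (pccFiltMap name.toList) := rfl
  rw [hgo, ← tokens_eq name, fold_consume_zero]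
  simp only [Bool.false_or]
lemma a_eq_core (name category : String) :
    pricing_confidence_ceiling name category =
    (let sing := ((PySem.Str.split₀ (normalized_name name)).filter (fun t => t ≠ "")).map singularize_token
     let non_modifier := sing.filter (fun t => !(GENERIC_MODIFIERS.contains t))
     let specific := non_modifier.filter (fun t => !(GENERIC_ITEM_TERMS.contains t))
     let ready : Bool :=
       if non_modifier.isEmpty then false
       else if non_modifier.length == 1 && GENERIC_ITEM_TERMS.contains (non_modifier.headD "") then false
       else if specific.isEmpty && category == "Other" then false
       else true
     if ready then (100 : Int)
     else if category == "Electronics" then 72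
     else if category == "Furniture" then 76
     else if !(PySem.Set.inter (PySem.Set.ofList sing) FASHION_TERMS).isEmpty then 74
     else 70) := by
  simp only [pricing_confidence_ceiling, assess_pricing_detail]
  split_ifs <;> rfl

lemma if_ready (L M : Bool) (T : Int) :
    (if (if L then false else if M then false else true) = true then (100 : Int) else T) =
    (if (L || M) = false then (100 : Int) else T) := by
  cases L <;> cases M <;> simp

lemma decision (sing : List String) (category : String) :
    (let nonmod := sing.filter (fun t => !(GENERIC_MODIFIERS.contains t))
     let specific := nonmod.filter (fun t => !(GENERIC_ITEM_TERMS.contains t))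
     let ready : Bool :=
       if nonmod.isEmpty then false
       else if nonmod.length == 1 && GENERIC_ITEM_TERMS.contains (nonmod.headD "") then false
       else if specific.isEmpty && category == "Other" then false
       else true
     if ready then (100 : Int)
     else if category == "Electronics" then 72
     else if category == "Furniture" then 76
     else if !(PySem.Set.inter (PySem.Set.ofList sing) FASHION_TERMS).isEmpty then 74
     else 70) =
    (let nonmod := sing.filter (fun t => !(GENERIC_MODIFIERS.contains t))
     let not_ready := ((nonmod.length : Int) == 0)
       || (((nonmod.length : Int) == 1) &&
           (match nonmod.head? with | some s => GENERIC_ITEM_TERMS.contains s | none => false))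
       || (!(!(nonmod.filter (fun t => !(GENERIC_ITEM_TERMS.contains t))).isEmpty) && category == "Other")
     if !not_ready then (100 : Int)
     else if category == "Electronics" then 72
     else if category == "Furniture" then 76
     else if sing.any (fun t => FASHION_TERMS.contains t) then 74
     else 70) := by
  rw [inter_ofList_nonempty]
  cases hn : sing.filter (fun t => !(GENERIC_MODIFIERS.contains t)) with
  | nil => simp
  | cons h t =>
    simp only [List.isEmpty_cons, List.length_cons, List.head?_cons, List.headD_cons,
      Bool.false_eq_true, if_false, Bool.not_eq_true']
    have h0 : ((t.length + 1 : Nat) : Int) ≠ 0 := by push_cast; omega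
    have hbeq0 : (((t.length + 1 : Nat) : Int) == 0) = false := by simpa using h0
    have hbeq1 : (((t.length + 1 : Nat) : Int) == 1) = ((t.length + 1) == 1) := by
      rcases Nat.eq_zero_or_pos t.length with h | h
      · simp [h]
      · have : ((t.length + 1 : Nat) : Int) ≠ 1 := by push_cast; omega
        have : (((t.length + 1 : Nat) : Int) == 1) = false := by simpa using this
        rw [this]
        symm
        simpa using (by omega : t.length + 1 ≠ 1)
    rw [hbeq0, hbeq1]
    simp only [Bool.false_or, Bool.not_not]
    exact if_ready _ _ _
-- ===== VERDICT (by name: the statement is the Claim_ definition above) =====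
set_option maxHeartbeats 1000000 in
theorem pricing_confidence_ceiling_spec : Claim_equal_pricing_confidence_ceiling := by
  intro name category _
  unfold Spec_pricing_confidence_ceiling
  rw [a_eq_core]
  simp only [pricing_confidence_ceiling_alt]
  rw [alt_state]
  generalize ((PySem.Str.split₀ (normalized_name name)).filter (fun t => t ≠ "")).map singularize_token = sing
  exact decision sing category
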